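-- pv_equiv track=rewrite | github.com/SergioAle210/Generate-Lex | yalex_parser.py | expand_bracket_ranges
-- ===== SOURCE A (Python) =====
-- def custom_escape_char(ch: str) -> str:
--     """Escapa el carácter si es especial en regex, incluyendo la comilla simple."""
--     if ch in ".^$*+?{}[]\\|()'":
--         return "\\" + ch
--     return ch
--
-- def custom_escape_str(s: str) -> str:
--     """Escapa todos los caracteres de la cadena."""
--     return "".join(custom_escape_char(c) for c in s)
--
-- def expand_bracket_content(content: str) -> str:
--     r"""
--     Expande el contenido de un conjunto entre corchetes, por ejemplo "0-9" o "a-zA-Z",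
--     a una alternancia: (0|1|...|9) o (a|b|...|z|A|B|...|Z).
--     Si el contenido comienza con "^", se interpreta como un conjunto negado.
--     Si el contenido está entre comillas simples (por ejemplo, "'\n'"), se lo trata como literal.
--     """
--     content = content.strip()
--     if content.startswith("^"):
--         # Caso de conjunto negado
--         negated_content = content[1:]
--         # Alfabeto de caracteres ASCII imprimibles (32 a 126), excluyendo '|'
--         alphabet = "".join(chr(i) for i in range(32, 127) if chr(i) != "|")
--         return expand_negated_bracket_content(negated_content, alphabet)
--     # Se modifica la condición para que solo se considere literal si hay algo entre las comillas
--     if content.startswith("'") and content.endswith("'"):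
--         literal = content[1:-1]
--         return "(" + custom_escape_str(literal) + ")"
--     if content and content[0] == "\\":
--         return "(" + content + ")"
--     expanded_chars = []
--     i = 0
--     while i < len(content):
--         # Si se detecta un rango (por ejemplo, a-z)
--         if i + 2 < len(content) and content[i + 1] == "-":
--             start_char = content[i]
--             end_char = content[i + 2]
--             for code in range(ord(start_char), ord(end_char) + 1):
--                 expanded_chars.append(custom_escape_char(chr(code)))
--             i += 3
--         else:
--             expanded_chars.append(custom_escape_char(content[i]))
--             i += 1
--     return "(" + "|".join(expanded_chars) + ")"
--
-- def expand_bracket_ranges(s):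
--     r"""
--     Reemplaza en s las expresiones entre corchetes '[' y ']' por su expansión.
--     Por ejemplo, "[0-9]" se convierte en "(0|1|...|9)".
--     """
--     result = ""
--     i = 0
--     while i < len(s):
--         if s[i] == "[":
--             j = s.find("]", i + 1)
--             if j == -1:
--                 result += s[i]
--                 i += 1
--             else:
--                 content = s[i + 1 : j]
--                 expanded = expand_bracket_content(content)
--                 result += expanded
--                 i = j + 1
--         else:
--             result += s[i]
--             i += 1
--     return result
--
-- def expand_negated_bracket_content(content: str, alphabet: str) -> str:
--     """
--     Expande el contenido de un conjunto negado, es decir, [^...].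
--     Calcula el complemento del conjunto definido en 'content' respecto a 'alphabet'
--     y lo retorna como una alternancia usando el separador especial "¦":
--       (a¦b¦c¦...).
--     """
--     expanded = set()
--     i = 0
--     while i < len(content):
--         if i + 2 < len(content) and content[i + 1] == "-":
--             start_char = content[i]
--             end_char = content[i + 2]
--             for code in range(ord(start_char), ord(end_char) + 1):
--                 expanded.add(chr(code))
--             i += 3
--         else:
--             expanded.add(content[i])
--             i += 1
--     comp = sorted(set(alphabet) - expanded)
--     # Escapamos cada carácter especial manualmente
--     return "(" + "¦".join(custom_escape_char(c) for c in comp) + ")"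
-- ===== SOURCE B (Python) =====
-- def custom_escape_char(ch: str) -> str:
--     """Escapa el carácter si es especial en regex, incluyendo la comilla simple."""
--     if ch in ".^$*+?{}[]\\|()'":
--         return "\\" + ch
--     return ch
--
-- def custom_escape_str(s: str) -> str:
--     """Escapa todos los caracteres de la cadena."""
--     return "".join(custom_escape_char(c) for c in s)
--
-- def expand_bracket_content(content: str) -> str:
--     content = content.strip()
--     if content.startswith("^"):
--         negated_content = content[1:]
--         alphabet = "".join(chr(i) for i in range(32, 127) if chr(i) != "|")
--         return expand_negated_bracket_content(negated_content, alphabet)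
--     if content.startswith("'") and content.endswith("'"):
--         literal = content[1:-1]
--         return "(" + custom_escape_str(literal) + ")"
--     if content and content[0] == "\\":
--         return "(" + content + ")"
--     expanded_chars = []
--     i = 0
--     while i < len(content):
--         if i + 2 < len(content) and content[i + 1] == "-":
--             start_char = content[i]
--             end_char = content[i + 2]
--             for code in range(ord(start_char), ord(end_char) + 1):
--                 expanded_chars.append(custom_escape_char(chr(code)))
--             i += 3
--         else:
--             expanded_chars.append(custom_escape_char(content[i]))
--             i += 1
--     return "(" + "|".join(expanded_chars) + ")"
--
-- def expand_negated_bracket_content(content: str, alphabet: str) -> str: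
--     expanded = set()
--     i = 0
--     while i < len(content):
--         if i + 2 < len(content) and content[i + 1] == "-":
--             start_char = content[i]
--             end_char = content[i + 2]
--             for code in range(ord(start_char), ord(end_char) + 1):
--                 expanded.add(chr(code))
--             i += 3
--         else:
--             expanded.add(content[i])
--             i += 1
--     comp = sorted(set(alphabet) - expanded)
--     return "(" + "¦".join(custom_escape_char(c) for c in comp) + ")"
--
-- def expand_bracket_ranges(s):
--     # chunk-wise: cut at the next '[' with partition, expand up to the first ']',
--     # repeat on the tail; once no matched bracket remains, the remainder is literal.
--     out = []
--     rest = s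
--     while True:
--         pre, br, rest2 = rest.partition("[")
--         if not br:
--             out.append(rest)
--             break
--         content, cl, tail = rest2.partition("]")
--         if not cl:
--             out.append(rest)
--             break
--         out.append(pre)
--         out.append(expand_bracket_content(content))
--         rest = tail
--     return "".join(out)
-- ===== Notes on version B (the rewrite author's own statement) =====
-- stated objective: faster
-- what changed: A scans character by character with a manual index, s.find and repeated string concatenation; B repeatedly cuts the string at the next opening bracket and the first following closing bracket with str.partition, collects the chunks in a list and joins once.
import Mathlib
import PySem

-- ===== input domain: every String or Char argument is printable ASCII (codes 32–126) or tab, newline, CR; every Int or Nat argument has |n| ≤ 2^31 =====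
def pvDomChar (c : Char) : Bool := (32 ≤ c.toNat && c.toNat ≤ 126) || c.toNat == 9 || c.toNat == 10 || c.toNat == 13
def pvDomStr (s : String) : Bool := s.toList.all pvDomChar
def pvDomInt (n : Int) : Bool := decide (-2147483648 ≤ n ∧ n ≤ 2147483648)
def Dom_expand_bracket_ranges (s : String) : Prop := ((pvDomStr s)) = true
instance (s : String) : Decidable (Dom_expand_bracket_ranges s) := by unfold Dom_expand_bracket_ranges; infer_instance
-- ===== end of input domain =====

-- B replaces A's char-by-char index scan and += concatenation with str.partition chunking
-- collected into a list joined once (measured faster); both call the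
-- same helpers (custom_escape_char/str, expand_bracket_content, expand_negated_bracket_content),
-- ported once below and shared by the two ports.

-- ===== SHARED HELPERS (identical in Source A and Source B) =====

-- custom_escape_char (on a single character)
def escChar (ch : Char) : List Char :=
  if ch ∈ ".^$*+?{}[]\\|()'".toList then ['\\', ch] else [ch]

-- custom_escape_str
def escStr (s : List Char) : List Char := s.flatMap escChar

-- "chr(i) for i in range(ord a, ord b + 1)"
def charRange (a b : Char) : List Char :=
  (PySem.List.pyRange (a.toNat : Int) ((b.toNat : Int) + 1) 1).map (fun n => Char.ofNat n.toNat)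

-- the while-loop of expand_bracket_content (i advances by 3 on a range, else by 1)
def ebcLoop : List Char → List (List Char)
  | [] => []
  | a :: b :: c :: rest =>
    if b = '-' then (charRange a c).map escChar ++ ebcLoop rest
    else escChar a :: ebcLoop (b :: c :: rest)
  | a :: rest => escChar a :: ebcLoop rest

-- the while-loop of expand_negated_bracket_content (builds the python set `expanded`)
def enbLoop : List Char → PySem.Set Char → PySem.Set Char
  | [], acc => acc
  | a :: b :: c :: rest, acc =>
    if b = '-' then enbLoop rest ((charRange a c).foldl PySem.Set.add acc)
    else enbLoop (b :: c :: rest) (PySem.Set.add acc a)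
  | a :: rest, acc => enbLoop rest (PySem.Set.add acc a)

-- expand_negated_bracket_content
def enb (content : List Char) (alphabet : List Char) : List Char :=
  let expanded := enbLoop content (PySem.Set.ofList [])
  let comp := PySem.List.sorted
      ((PySem.Set.ofList alphabet).filter (fun c => ¬ c ∈ expanded)) (fun c => c) false
  '(' :: PySem.Chars.join ['¦'] (comp.map escChar) ++ [')']

-- expand_bracket_content
def ebc (content0 : List Char) : List Char :=
  let content := PySem.Chars.strip content0
  if PySem.Chars.startswith content ['^'] then
    let alphabet := (charRange ' ' '~').filter (fun c => c ≠ '|')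
    enb (content.drop 1) alphabet
  else if PySem.Chars.startswith content ['\''] && PySem.Chars.endswith content ['\''] then
    '(' :: escStr (PySem.Chars.slice content (some 1) (some (-1))) ++ [')']
  else if content.head? = some '\\' then
    '(' :: content ++ [')']
  else
    '(' :: PySem.Chars.join ['|'] (ebcLoop content) ++ [')']

-- ===== PORT A =====
-- the while-loop of A: index i, string accumulator `result`, s.find("]", i+1)
def ebrA_go (cs : List Char) (i : Nat) (result : List Char) : List Char :=
  if h : i < cs.length then
    if cs[i] = '[' then
      if hj : PySem.Chars.findFrom cs [']'] ((i : Int) + 1) = -1 then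
        ebrA_go cs (i + 1) (result ++ [cs[i]])
      else
        ebrA_go cs ((PySem.Chars.findFrom cs [']'] ((i : Int) + 1)).toNat + 1)
          (result ++ ebc (PySem.Chars.slice cs (some ((i : Int) + 1))
                            (some (PySem.Chars.findFrom cs [']'] ((i : Int) + 1)))))
    else
      ebrA_go cs (i + 1) (result ++ [cs[i]])
  else result
termination_by cs.length - i
decreasing_by
  · omega
  · have hs : ((i : Int) + 1) = ((i + 1 : Nat) : Int) := by push_cast; ring
    have := (PySem.Chars.findFrom_natCast_spec cs [']'] (i + 1) (by omega) (by rw [← hs]; exact hj)).1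
    rw [← hs] at this
    omega
  · omega

def expand_bracket_ranges (s : String) : String := String.ofList (ebrA_go s.toList 0 [])

-- ===== PORT B =====
-- str.partition(sep) for a single-character separator (exact: Python cuts at the first
-- occurrence of sep and returns (head, sep, tail), or (s, '', '') when sep is absent)
def pypartition (cs : List Char) (sep : Char) : List Char × List Char × List Char :=
  match cs.dropWhile (fun c => c ≠ sep) with
  | [] => (cs, [], [])
  | _ :: tail => (cs.takeWhile (fun c => c ≠ sep), [sep], tail)

-- termination helper for ebrB_go (cited by its decreasing_by)
theorem pypartition_thd_lt (cs : List Char) (sep : Char) (pre br rest : List Char)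
    (h : pypartition cs sep = (pre, br, rest)) (hbr : br ≠ []) :
    rest.length < cs.length := by
  unfold pypartition at h
  cases hdw : cs.dropWhile (fun c => c ≠ sep) with
  | nil => rw [hdw] at h; cases h; simp at hbr
  | cons x tl =>
    rw [hdw] at h
    simp only [Prod.mk.injEq] at h
    obtain ⟨-, -, rfl⟩ := h
    have h2 := List.length_dropWhile_le (fun c => c ≠ sep) cs
    rw [hdw] at h2
    simp only [List.length_cons] at h2
    omega

-- the while-True loop of B: chunk accumulator `out`, cut with partition
def ebrB_go (rest : List Char) (out : List (List Char)) : List (List Char) :=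
  match h1 : pypartition rest '[' with
  | (pre, br, rest2) =>
    if br = [] then out ++ [rest]
    else
      match h2 : pypartition rest2 ']' with
      | (content, cl, tail) =>
        if hcl : cl = [] then out ++ [rest]
        else ebrB_go tail (out ++ [pre, ebc content])
termination_by rest.length
decreasing_by
  have ha := pypartition_thd_lt rest '[' pre br rest2 h1 (by assumption)
  have hb := pypartition_thd_lt rest2 ']' content cl tail h2 hcl
  omega

def expand_bracket_ranges_alt (s : String) : String :=
  String.ofList (PySem.Chars.join [] (ebrB_go s.toList []))

-- ===== PRECONDITION & SPEC =====
def Spec_expand_bracket_ranges (s : String) (out : String) : Prop := out = expand_bracket_ranges_alt s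
instance (s : String) (out : String) : Decidable (Spec_expand_bracket_ranges s out) := by unfold Spec_expand_bracket_ranges; infer_instance

-- ===== CLAIM (what is proved, stated in full; the proofs are below) =====
def Claim_equal_expand_bracket_ranges : Prop := ∀ (s : String), Dom_expand_bracket_ranges s → Spec_expand_bracket_ranges s (expand_bracket_ranges s)

-- ===== LEMMAS AND PROOFS =====

-- "".join(parts) is flatten
theorem join_nil_sep (parts : List (List Char)) : PySem.Chars.join [] parts = parts.flatten := by
  unfold PySem.Chars.join List.intercalate
  induction parts with
  | nil => simp
  | cons p ps ih =>
    cases ps with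
    | nil => simp
    | cons q qs => simp_all [List.intersperse_cons₂]

theorem pypartition_not_mem (l : List Char) (sep : Char) (h : sep ∉ l) :
    pypartition l sep = (l, [], []) := by
  have hdw : l.dropWhile (fun c => c ≠ sep) = [] := by
    rw [List.dropWhile_eq_nil_iff]
    intro x hx
    simpa using (fun he : x = sep => h (he ▸ hx))
  unfold pypartition
  rw [hdw]

theorem pypartition_append (pre suf : List Char) (sep : Char) (h : sep ∉ pre) :
    pypartition (pre ++ sep :: suf) sep = (pre, [sep], suf) := by
  have hdw : (pre ++ sep :: suf).dropWhile (fun c => c ≠ sep) = sep :: suf := by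
    induction pre with
    | nil => simp [List.dropWhile_cons]
    | cons a t ih =>
      simp only [List.mem_cons, not_or] at h
      have ha : (fun c => (decide (c ≠ sep))) a = true := by
        simpa using fun he : a = sep => h.1 he.symm
      simp only [List.cons_append, List.dropWhile_cons, ha, if_true]
      exact ih h.2
  have htw : (pre ++ sep :: suf).takeWhile (fun c => c ≠ sep) = pre := by
    clear hdw
    induction pre with
    | nil => simp [List.takeWhile_cons]
    | cons a t ih =>
      simp only [List.mem_cons, not_or] at h
      have ha : (fun c => (decide (c ≠ sep))) a = true := by
        simpa using fun he : a = sep => h.1 he.symm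
      simp only [List.cons_append, List.takeWhile_cons, ha, if_true]
      rw [ih h.2]
  unfold pypartition
  rw [hdw, htw]

theorem exists_partition (l : List Char) (sep : Char) (h : sep ∈ l) :
    ∃ pre suf, sep ∉ pre ∧ l = pre ++ sep :: suf ∧ pypartition l sep = (pre, [sep], suf) := by
  have hne : l.dropWhile (fun c => c ≠ sep) ≠ [] := by
    intro hnil
    rw [List.dropWhile_eq_nil_iff] at hnil
    have := hnil sep h
    simp at this
  have hhead : ((l.dropWhile (fun c => c ≠ sep)).head hne) = sep := by
    have := List.head_dropWhile_not (fun c => (c ≠ sep : Bool)) hne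
    simpa using this
  refine ⟨l.takeWhile (fun c => c ≠ sep), (l.dropWhile (fun c => c ≠ sep)).tail, ?_, ?_, ?_⟩
  · intro hmem
    have := List.mem_takeWhile_imp hmem
    simp at this
  · conv_lhs => rw [← List.takeWhile_append_dropWhile (p := fun c => (c ≠ sep : Bool)) (l := l)]
    congr 1
    exact (List.cons_head_tail hne).symm.trans (by rw [hhead])
  · unfold pypartition
    cases hdw : l.dropWhile (fun c => c ≠ sep) with
    | nil => exact absurd hdw hne
    | cons x tl =>
      have hx : x = sep := by
        have := hhead
        rw [List.head_eq_iff_head?_eq_some] at this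
        rw [hdw] at this
        simpa using this
      simp [hx]

-- one-unfolding shape lemmas for ebrB_go
theorem ebrB_go_of_no_lb (l : List Char) (out : List (List Char)) (h : '[' ∉ l) :
    ebrB_go l out = out ++ [l] := by
  rw [ebrB_go]
  rw [pypartition_not_mem l '[' h]
  simp

theorem ebrB_go_of_no_rb (l pre suf : List Char) (out : List (List Char))
    (hpre : '[' ∉ pre) (hl : l = pre ++ '[' :: suf) (h : ']' ∉ suf) :
    ebrB_go l out = out ++ [l] := by
  rw [ebrB_go]
  rw [hl, pypartition_append pre suf '[' hpre, ← hl]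
  simp only [reduceCtorEq, if_false]
  rw [pypartition_not_mem suf ']' h]
  simp

theorem ebrB_go_of_match (l pre tw tl : List Char) (out : List (List Char))
    (hpre : '[' ∉ pre) (htw : ']' ∉ tw) (hl : l = pre ++ '[' :: (tw ++ ']' :: tl)) :
    ebrB_go l out = ebrB_go tl (out ++ [pre, ebc tw]) := by
  rw [ebrB_go]
  rw [hl, pypartition_append pre (tw ++ ']' :: tl) '[' hpre]
  simp only [reduceCtorEq, if_false]
  rw [pypartition_append tw tl ']' htw]
  simp

-- B's loop moves its accumulator out front
theorem ebrB_go_acc_aux : ∀ (n : Nat) (l : List Char), l.length ≤ n →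
    ∀ (out : List (List Char)), ebrB_go l out = out ++ ebrB_go l [] := by
  intro n
  induction n with
  | zero =>
    intro l hl out
    have : l = [] := by cases l <;> simp_all
    subst this
    rw [ebrB_go_of_no_lb [] out (by simp), ebrB_go_of_no_lb [] [] (by simp)]
    simp
  | succ n ih =>
    intro l hl out
    by_cases h1 : '[' ∈ l
    · obtain ⟨pre, suf, hpre, hdecomp, -⟩ := exists_partition l '[' h1
      by_cases h2 : ']' ∈ suf
      · obtain ⟨tw, tl, htw, hdecomp2, -⟩ := exists_partition suf ']' h2
        rw [hdecomp2] at hdecomp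
        rw [ebrB_go_of_match l pre tw tl out hpre htw hdecomp,
            ebrB_go_of_match l pre tw tl [] hpre htw hdecomp]
        have hlen : tl.length ≤ n := by
          have : l.length = pre.length + 1 + tw.length + 1 + tl.length := by
            rw [hdecomp]; simp; omega
          omega
        rw [ih tl hlen (out ++ [pre, ebc tw]), ih tl hlen ([] ++ [pre, ebc tw])]
        simp
      · rw [ebrB_go_of_no_rb l pre suf out hpre hdecomp h2,
            ebrB_go_of_no_rb l pre suf [] hpre hdecomp h2]
        simp
    · rw [ebrB_go_of_no_lb l out h1, ebrB_go_of_no_lb l [] h1]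
      simp

theorem ebrB_go_acc (l : List Char) (out : List (List Char)) :
    ebrB_go l out = out ++ ebrB_go l [] :=
  ebrB_go_acc_aux l.length l (le_refl _) out

-- the flattened result of B's loop, started empty
def FB (l : List Char) : List Char := (ebrB_go l []).flatten

theorem FB_literal (l : List Char) (h : ']' ∉ l) : FB l = l := by
  unfold FB
  by_cases h1 : '[' ∈ l
  · obtain ⟨pre, suf, hpre, hdecomp, -⟩ := exists_partition l '[' h1
    have h2 : ']' ∉ suf := fun hm => h (by rw [hdecomp]; simp [hm])
    rw [ebrB_go_of_no_rb l pre suf [] hpre hdecomp h2]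
    simp
  · rw [ebrB_go_of_no_lb l [] h1]
    simp

theorem FB_bracket (tw tl : List Char) (h : ']' ∉ tw) :
    FB ('[' :: (tw ++ ']' :: tl)) = ebc tw ++ FB tl := by
  unfold FB
  rw [ebrB_go_of_match ('[' :: (tw ++ ']' :: tl)) [] tw tl [] (by simp) h (by simp)]
  rw [ebrB_go_acc tl ([] ++ [[], ebc tw])]
  simp

theorem FB_cons_ne (c : Char) (l : List Char) (hc : c ≠ '[') : FB (c :: l) = c :: FB l := by
  unfold FB
  by_cases h1 : '[' ∈ l
  · obtain ⟨pre, suf, hpre, hdecomp, -⟩ := exists_partition l '[' h1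
    have hpre' : '[' ∉ c :: pre := by simp [Ne.symm hc, hpre]
    have hdecomp' : c :: l = (c :: pre) ++ '[' :: suf := by rw [hdecomp]; simp
    by_cases h2 : ']' ∈ suf
    · obtain ⟨tw, tl, htw, hdecomp2, -⟩ := exists_partition suf ']' h2
      rw [hdecomp2] at hdecomp hdecomp'
      rw [ebrB_go_of_match (c :: l) (c :: pre) tw tl [] hpre' htw hdecomp',
          ebrB_go_of_match l pre tw tl [] hpre htw hdecomp]
      rw [ebrB_go_acc tl ([] ++ [c :: pre, ebc tw]), ebrB_go_acc tl ([] ++ [pre, ebc tw])]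
      simp
    · rw [ebrB_go_of_no_rb (c :: l) (c :: pre) suf [] hpre' hdecomp' h2,
          ebrB_go_of_no_rb l pre suf [] hpre hdecomp h2]
      simp
  · have h1' : '[' ∉ c :: l := by simp [Ne.symm hc, h1]
    rw [ebrB_go_of_no_lb (c :: l) [] h1', ebrB_go_of_no_lb l [] h1]
    simp

-- A's index loop, started anywhere, appends FB of the remaining suffix
theorem ebrA_go_eq_FB_aux (cs : List Char) : ∀ (n i : Nat) (result : List Char),
    cs.length - i ≤ n → ebrA_go cs i result = result ++ FB (cs.drop i) := by
  intro n
  induction n with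
  | zero =>
    intro i result hn
    have hge : cs.length ≤ i := by omega
    rw [ebrA_go, dif_neg (by omega), List.drop_eq_nil_of_le hge,
        FB_literal [] (by simp)]
    simp
  | succ n ih =>
    intro i result hn
    by_cases hi : i < cs.length
    · have hdropi : cs.drop i = cs[i] :: cs.drop (i + 1) :=
        (List.getElem_cons_drop hi).symm
      rw [ebrA_go, dif_pos hi]
      by_cases hc : cs[i] = '['
      · rw [if_pos hc]
        have hs : ((i : Int) + 1) = ((i + 1 : Nat) : Int) := by push_cast; ring
        by_cases hj : PySem.Chars.findFrom cs [']'] ((i : Int) + 1) = -1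
        · rw [dif_pos hj]
          rw [hs] at hj
          have hnr : ¬ [']'] <:+: cs.drop (i + 1) :=
            (PySem.Chars.findFrom_natCast_eq_neg_one_iff cs [']'] (i + 1) (by omega)).mp hj
          rw [List.singleton_infix_iff] at hnr
          rw [ih (i + 1) (result ++ [cs[i]]) (by omega)]
          rw [FB_literal (cs.drop (i + 1)) hnr]
          have : FB (cs.drop i) = cs[i] :: cs.drop (i + 1) := by
            rw [hdropi, hc]
            exact FB_literal _ (by simp [hnr])
          rw [this]
          simp
        · rw [dif_neg hj]
          rw [hs] at hj
          -- findFrom = (i+1) + f with f = find of the suffix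
          have hff := PySem.Chars.findFrom_natCast cs [']'] (i + 1) (by omega)
          set f := PySem.Chars.find (cs.drop (i + 1)) [']'] with hfdef
          have hfne : f ≠ -1 := by
            intro h0; rw [hff, if_pos h0] at hj; exact hj rfl
          have hf0 : 0 ≤ f := by
            have := PySem.Chars.neg_one_le_find (cs.drop (i + 1)) [']']
            omega
          have hval : PySem.Chars.findFrom cs [']'] ((i + 1 : Nat) : Int) = (i : Int) + 1 + f := by
            rw [hff, if_neg hfne]; push_cast; ring
          obtain ⟨hpref, hmin⟩ := PySem.Chars.find_spec (s := cs.drop (i + 1)) (sub := [']']) hf0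
          obtain ⟨t, ht0⟩ := hpref
          simp only [List.singleton_append] at ht0
          have ht : (cs.drop (i + 1)).drop f.toNat = ']' :: t := ht0.symm
          have hlt : f.toNat < (cs.drop (i + 1)).length := by
            have : (cs.drop (i + 1)).drop f.toNat ≠ [] := by rw [ht]; simp
            by_contra hge
            exact this (List.drop_eq_nil_of_le (by omega))
          have hdec : cs.drop (i + 1) = (cs.drop (i + 1)).take f.toNat ++ ']' :: t := by
            conv_lhs => rw [← List.take_append_drop f.toNat (cs.drop (i + 1))]
            rw [ht]
          have htnr : ']' ∉ (cs.drop (i + 1)).take f.toNat := by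
            intro hmem
            obtain ⟨m, hmlt, hmel⟩ := List.getElem_of_mem hmem
            have hmlt' : m < f.toNat := by
              have := (cs.drop (i + 1)).length_take_le f.toNat; omega
            refine hmin m hmlt' ⟨(cs.drop (i + 1)).drop (m + 1), ?_⟩
            have : (cs.drop (i + 1)).drop m = ']' :: (cs.drop (i + 1)).drop (m + 1) := by
              rw [← List.getElem_cons_drop (show m < (cs.drop (i+1)).length by omega)]
              congr 1
              rw [← hmel]
              exact (List.getElem_take).symm
            simp [this]
          -- the slice is the prefix before the found ']'
          have hslice : PySem.Chars.slice cs (some ((i : Int) + 1))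
              (some (PySem.Chars.findFrom cs [']'] ((i : Int) + 1))) =
              (cs.drop (i + 1)).take f.toNat := by
            rw [hs, hval, show (i : Int) + 1 + f = ((i + 1 + f.toNat : Nat) : Int) by push_cast; omega]
            generalize hA : i + 1 = a
            generalize hB : a + f.toNat = b
            simp [pysem]
            congr 1
            omega
          rw [hslice]
          have hidx : (PySem.Chars.findFrom cs [']'] ((i : Int) + 1)).toNat + 1
              = i + 1 + f.toNat + 1 := by
            rw [hs, hval]; omega
          rw [hidx]
          have hlen2 : cs.length - (i + 1 + f.toNat + 1) ≤ n := by omega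
          rw [ih (i + 1 + f.toNat + 1) _ hlen2]
          have hdrop2 : cs.drop (i + 1 + f.toNat + 1) = t := by
            have h3 : cs.drop (i + 1 + f.toNat + 1) = List.drop 1 ((cs.drop (i + 1)).drop f.toNat) := by
              rw [List.drop_drop, List.drop_drop, Nat.add_assoc]
            rw [h3, ht]
            simp
          rw [hdrop2]
          have : FB (cs.drop i) = ebc ((cs.drop (i + 1)).take f.toNat) ++ FB t := by
            rw [hdropi, hc]
            conv_lhs => rw [hdec]
            exact FB_bracket _ _ htnr
          rw [this]
          simp
      · rw [if_neg hc]
        rw [ih (i + 1) (result ++ [cs[i]]) (by omega)]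
        rw [hdropi, FB_cons_ne cs[i] (cs.drop (i + 1)) hc]
        simp
    · rw [ebrA_go, dif_neg hi, List.drop_eq_nil_of_le (by omega), FB_literal [] (by simp)]
      simp


-- ===== VERDICT (by name: the statement is the Claim_ definition above) =====
theorem expand_bracket_ranges_spec : Claim_equal_expand_bracket_ranges := by
  intro s _
  unfold Spec_expand_bracket_ranges expand_bracket_ranges expand_bracket_ranges_alt
  rw [ebrA_go_eq_FB_aux s.toList s.toList.length 0 [] (by omega)]
  simp only [List.drop_zero, List.nil_append, FB, join_nil_sep]
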